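-- pv_equiv track=rewrite | github.com/cjdiaz98/OpenFacts | TreeToList.py | removeBeginnings
-- ===== SOURCE A (Python) =====
-- def containsCargo(word):
--     cur = ""
--     for elem in word:
--         cur += elem
--         if cur == "cargo":
--             return True
--     return False
--
-- def removeBeginnings(mylist):
--     while containsCargo(mylist[0]) == False and len(mylist) > 2:
--         mylist.pop(0)
--
--     if containsCargo(mylist[0]) and len(mylist[0]) > 6:
--         cur = mylist[0]
--         mylist[0] = cur[6:]
--         return mylist
--     mylist.pop(0)
--     return mylist
-- ===== SOURCE B (Python) =====
-- def removeBeginnings(mylist):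
--     # single index scan instead of repeated front pops, then one bulk delete
--     j = 0
--     while j < len(mylist) - 2 and not mylist[j].startswith("cargo"):
--         j += 1
--     del mylist[:j]
--     head = mylist[0]
--     if head.startswith("cargo") and len(head) > 6:
--         mylist[0] = head[6:]
--     else:
--         mylist.pop(0)
--     return mylist
-- ===== Notes on version B (the rewrite author's own statement) =====
-- stated objective: faster
-- what changed: Replaces the while-loop of repeated mylist.pop(0) front pops with a single index scan finding the cut point followed by one bulk del mylist[:j], and replaces the char-accumulating containsCargo helper with str.startswith('cargo').
-- outside the precondition, e.g. on removeBeginnings([]): A raises IndexError, B raises IndexError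
import Mathlib
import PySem

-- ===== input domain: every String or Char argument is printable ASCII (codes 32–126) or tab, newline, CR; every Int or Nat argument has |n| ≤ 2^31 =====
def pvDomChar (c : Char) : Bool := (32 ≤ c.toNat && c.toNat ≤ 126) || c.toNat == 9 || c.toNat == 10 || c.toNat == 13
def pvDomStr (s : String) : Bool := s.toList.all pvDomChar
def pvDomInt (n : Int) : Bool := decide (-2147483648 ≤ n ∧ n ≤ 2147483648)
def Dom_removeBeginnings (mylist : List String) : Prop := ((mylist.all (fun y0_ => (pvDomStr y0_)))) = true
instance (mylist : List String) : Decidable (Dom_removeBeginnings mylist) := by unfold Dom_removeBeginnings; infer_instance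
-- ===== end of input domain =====

-- B replaces A's repeated front-pops with one index scan + bulk delete and uses startswith
-- instead of the char-accumulating helper; both mutate the list in place in Python, the
-- equivalence proved here is about the returned value.


-- ===== PORT A =====
-- containsCargo: build cur one character at a time, early-return once cur == "cargo"
def containsCargoA (cur : List Char) : List Char → Bool
  | [] => false
  | c :: rest =>
    let cur' := cur ++ [c]
    if cur' = "cargo".toList then true else containsCargoA cur' rest

-- while containsCargo(mylist[0]) == False and len(mylist) > 2: mylist.pop(0)
def rbLoopA : List String → List String
  | [] => []   -- Python raises IndexError on mylist[0] here; excluded by Pre_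
  | x :: rest =>
    if containsCargoA [] x.toList = false ∧ rest.length + 1 > 2 then rbLoopA rest
    else x :: rest

def removeBeginnings (mylist : List String) : List String :=
  match rbLoopA mylist with
  | [] => []   -- Python raises IndexError on mylist[0] here; excluded by Pre_
  | x :: rest =>
    if containsCargoA [] x.toList = true ∧ PySem.Str.len x > 6 then
      (PySem.Str.slice x (some 6) none) :: rest   -- mylist[0] = cur[6:]
    else rest   -- mylist.pop(0)

-- ===== PORT B =====
-- while j < len(mylist) - 2 and not mylist[j].startswith("cargo"): j += 1
def rbFindB (mylist : List String) (j : Nat) : Nat :=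
  if (j : Int) < (mylist.length : Int) - 2 then
    if PySem.Str.startswith (mylist.getD j "") "cargo" = false then rbFindB mylist (j + 1)
    else j
  else j
termination_by mylist.length - j
decreasing_by omega

def removeBeginnings_alt (mylist : List String) : List String :=
  match mylist.drop (rbFindB mylist 0) with   -- del mylist[:j]
  | [] => []   -- Python raises IndexError on mylist[0] here; excluded by Pre_
  | x :: rest =>
    if PySem.Str.startswith x "cargo" = true ∧ PySem.Str.len x > 6 then
      (PySem.Str.slice x (some 6) none) :: rest   -- mylist[0] = head[6:]
    else rest   -- mylist.pop(0)

-- ===== PRECONDITION & SPEC =====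
-- A raises IndexError on the empty list (mylist[0]); B raises there too.
def Pre_removeBeginnings (mylist : List String) : Prop := mylist ≠ []
instance (mylist : List String) : Decidable (Pre_removeBeginnings mylist) := by
  unfold Pre_removeBeginnings; infer_instance
def pvWitness_removeBeginnings : List String := ["abc", "cargo1234", "x"]
def Spec_removeBeginnings (mylist : List String) (out : List String) : Prop := out = removeBeginnings_alt mylist
instance (mylist : List String) (out : List String) : Decidable (Spec_removeBeginnings mylist out) := by unfold Spec_removeBeginnings; infer_instance

-- ===== CLAIM (what is proved, stated in full; the proofs are below) =====
def Claim_equal_removeBeginnings : Prop := ∀ (mylist : List String), Dom_removeBeginnings mylist → Pre_removeBeginnings mylist → Spec_removeBeginnings mylist (removeBeginnings mylist)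

-- ===== LEMMAS AND PROOFS =====

-- containsCargoA cur rest returns true iff some nonempty prefix of rest completes cur to "cargo"
theorem containsCargoA_iff (rest : List Char) (cur : List Char) :
    containsCargoA cur rest = true ↔
      ∃ k, 0 < k ∧ k ≤ rest.length ∧ cur ++ rest.take k = "cargo".toList := by
  induction rest generalizing cur with
  | nil =>
    constructor
    · intro h; simp [containsCargoA] at h
    · rintro ⟨k, hk0, hkle, -⟩; simp at hkle; omega
  | cons c rs ih =>
    simp only [containsCargoA]
    by_cases h : cur ++ [c] = "cargo".toList
    · rw [if_pos h]
      constructor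
      · intro _; exact ⟨1, one_pos, by simp, by simpa using h⟩
      · intro _; rfl
    · rw [if_neg h, ih]
      constructor
      · rintro ⟨k, hk0, hkle, hk⟩
        exact ⟨k + 1, by omega, by simp; omega, by simpa [List.take_succ_cons, List.append_assoc] using hk⟩
      · rintro ⟨k, hk0, hkle, hk⟩
        match k, hk0 with
        | 1, _ =>
          simp only [List.take_succ_cons, List.take_zero] at hk
          exact absurd hk h
        | (m+2), _ =>
          refine ⟨m + 1, by omega, by simp at hkle ⊢; omega, ?_⟩
          simpa [List.take_succ_cons, List.append_assoc] using hk

-- A's helper computes exactly str.startswith("cargo")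
theorem containsCargoA_eq_startswith (x : String) :
    containsCargoA [] x.toList = PySem.Str.startswith x "cargo" := by
  have h5 : ("cargo".toList).length = 5 := by decide
  have hiff : containsCargoA [] x.toList = true ↔ PySem.Str.startswith x "cargo" = true := by
    rw [containsCargoA_iff, PySem.Str.startswith_eq, PySem.Chars.startswith_iff]
    constructor
    · rintro ⟨k, hk0, hkle, hk⟩
      simp only [List.nil_append] at hk
      exact hk ▸ List.take_prefix k x.toList
    · intro hpre
      have hlen := hpre.length_le
      rw [h5] at hlen
      refine ⟨5, by omega, hlen, ?_⟩
      simp only [List.nil_append]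
      have hp := List.prefix_iff_eq_take.mp hpre
      rw [h5] at hp
      exact hp.symm
  exact Bool.eq_iff_iff.mpr hiff

-- the pop-front while loop equals dropping the prefix up to the scanned index
theorem rbLoopA_eq_drop (full : List String) (j : Nat) :
    rbLoopA (full.drop j) = full.drop (rbFindB full j) := by
  by_cases hj : j < full.length
  · have hd : full.drop j = full[j] :: full.drop (j + 1) := (List.getElem_cons_drop hj).symm
    rw [rbFindB, hd, rbLoopA]
    have hget : full.getD j "" = full[j] := List.getD_eq_getElem full "" hj
    have hlen : (full.drop (j + 1)).length = full.length - (j + 1) := List.length_drop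
    rw [containsCargoA_eq_startswith, hget]
    by_cases hcond : (j : Int) < (full.length : Int) - 2
    · rw [if_pos hcond]
      by_cases hsw : PySem.Str.startswith full[j] "cargo" = false
      · rw [if_pos hsw, if_pos ⟨hsw, by omega⟩]
        exact rbLoopA_eq_drop full (j + 1)
      · rw [if_neg hsw, if_neg (by simp at hsw; simp [hsw]), hd]
    · rw [if_neg hcond, if_neg (by intro ⟨_, h2⟩; omega), hd]
  · have hd : full.drop j = [] := List.drop_eq_nil_of_le (by omega)
    rw [rbFindB, if_neg (by omega), hd, rbLoopA]
termination_by full.length - j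
decreasing_by omega

-- ===== VERDICT (by name: the statement is the Claim_ definition above) =====
theorem removeBeginnings_spec : Claim_equal_removeBeginnings := by
  intro mylist _ _
  unfold Spec_removeBeginnings removeBeginnings removeBeginnings_alt
  have h := rbLoopA_eq_drop mylist 0
  rw [List.drop_zero] at h
  rw [h]
  cases mylist.drop (rbFindB mylist 0) with
  | nil => rfl
  | cons x rest => simp only [containsCargoA_eq_startswith]
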